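-- pv_equiv track=rewrite | github.com/RunDumy/Star | archive/star-backend-root-20251016/tonalpohualli.py | get_aztec_quality
-- ===== SOURCE A (Python) =====
-- def get_aztec_quality(day_sign):
--     """Get the quality category for an Aztec day sign."""
--     qualities = {
--         'Primal': ['Crocodile', 'Wind', 'House', 'Lizard', 'Serpent'],
--         'Transformative': ['Death', 'Deer', 'Rabbit', 'Water', 'Dog'],
--         'Creative': ['Monkey', 'Grass', 'Reed', 'Jaguar', 'Eagle'],
--         'Transcendent': ['Vulture', 'Movement', 'Flint', 'Storm', 'Sun']
--     }
--
--     for quality, signs in qualities.items():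
--         if day_sign in signs:
--             return quality
--     return 'Primal'
-- ===== SOURCE B (Python) =====
-- _QUALITY_BY_SIGN = {
--     'Crocodile': 'Primal', 'Wind': 'Primal', 'House': 'Primal',
--     'Lizard': 'Primal', 'Serpent': 'Primal',
--     'Death': 'Transformative', 'Deer': 'Transformative', 'Rabbit': 'Transformative',
--     'Water': 'Transformative', 'Dog': 'Transformative',
--     'Monkey': 'Creative', 'Grass': 'Creative', 'Reed': 'Creative',
--     'Jaguar': 'Creative', 'Eagle': 'Creative',
--     'Vulture': 'Transcendent', 'Movement': 'Transcendent', 'Flint': 'Transcendent',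
--     'Storm': 'Transcendent', 'Sun': 'Transcendent',
-- }
--
--
-- def get_aztec_quality(day_sign):
--     """Get the quality category for an Aztec day sign."""
--     return _QUALITY_BY_SIGN.get(day_sign, 'Primal')
-- ===== Notes on version B (the rewrite author's own statement) =====
-- stated objective: simpler
-- what changed: Replaced the per-call loop over category lists with a single prebuilt sign-to-quality dictionary looked up once with the original default for unknown signs; no loop or membership scan remains in the function.
import Mathlib
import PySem

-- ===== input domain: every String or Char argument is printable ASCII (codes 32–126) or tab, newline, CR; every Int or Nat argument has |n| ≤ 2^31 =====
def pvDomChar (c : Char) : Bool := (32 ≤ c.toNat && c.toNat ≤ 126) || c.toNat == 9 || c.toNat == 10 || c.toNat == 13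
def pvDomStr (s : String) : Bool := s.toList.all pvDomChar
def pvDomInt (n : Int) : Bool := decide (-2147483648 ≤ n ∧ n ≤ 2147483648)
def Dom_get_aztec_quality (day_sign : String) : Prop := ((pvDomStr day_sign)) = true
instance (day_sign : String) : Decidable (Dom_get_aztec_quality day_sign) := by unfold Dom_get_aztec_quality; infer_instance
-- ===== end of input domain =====

-- B replaces A's per-call loop over category lists with one prebuilt sign→quality table
-- looked up once with the original default for unknown signs (objective: simpler).

-- ===== PORT A =====
-- the qualities dict literal of A, in insertion order
def aztecQualities : List (String × List String) :=
  [("Primal", ["Crocodile", "Wind", "House", "Lizard", "Serpent"]),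
   ("Transformative", ["Death", "Deer", "Rabbit", "Water", "Dog"]),
   ("Creative", ["Monkey", "Grass", "Reed", "Jaguar", "Eagle"]),
   ("Transcendent", ["Vulture", "Movement", "Flint", "Storm", "Sun"])]

-- the `for quality, signs in qualities.items(): if day_sign in signs: return quality` loop
def aztecLoop (day_sign : String) : List (String × List String) → String
  | [] => "Primal"
  | (quality, signs) :: rest =>
      if signs.contains day_sign then quality else aztecLoop day_sign rest

def get_aztec_quality (day_sign : String) : String :=
  aztecLoop day_sign aztecQualities

-- ===== PORT B =====
-- the _QUALITY_BY_SIGN dict literal of Source B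
def qualityBySign : PySem.Dict String String :=
  PySem.Dict.ofList
    [("Crocodile", "Primal"), ("Wind", "Primal"), ("House", "Primal"),
     ("Lizard", "Primal"), ("Serpent", "Primal"),
     ("Death", "Transformative"), ("Deer", "Transformative"), ("Rabbit", "Transformative"),
     ("Water", "Transformative"), ("Dog", "Transformative"),
     ("Monkey", "Creative"), ("Grass", "Creative"), ("Reed", "Creative"),
     ("Jaguar", "Creative"), ("Eagle", "Creative"),
     ("Vulture", "Transcendent"), ("Movement", "Transcendent"), ("Flint", "Transcendent"),
     ("Storm", "Transcendent"), ("Sun", "Transcendent")]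

def get_aztec_quality_alt (day_sign : String) : String :=
  PySem.Dict.getD qualityBySign day_sign "Primal"

-- ===== PRECONDITION & SPEC =====
def Spec_get_aztec_quality (day_sign : String) (out : String) : Prop := out = get_aztec_quality_alt day_sign
instance (day_sign : String) (out : String) : Decidable (Spec_get_aztec_quality day_sign out) := by unfold Spec_get_aztec_quality; infer_instance

-- ===== CLAIM (what is proved, stated in full; the proofs are below) =====
def Claim_equal_get_aztec_quality : Prop := ∀ (day_sign : String), Dom_get_aztec_quality day_sign → Spec_get_aztec_quality day_sign (get_aztec_quality day_sign)

-- ===== LEMMAS AND PROOFS =====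
set_option maxHeartbeats 2000000 in
theorem qualityBySign_eq : qualityBySign = PySem.Dict.mk
    [("Crocodile", "Primal"), ("Wind", "Primal"), ("House", "Primal"),
     ("Lizard", "Primal"), ("Serpent", "Primal"),
     ("Death", "Transformative"), ("Deer", "Transformative"), ("Rabbit", "Transformative"),
     ("Water", "Transformative"), ("Dog", "Transformative"),
     ("Monkey", "Creative"), ("Grass", "Creative"), ("Reed", "Creative"),
     ("Jaguar", "Creative"), ("Eagle", "Creative"),
     ("Vulture", "Transcendent"), ("Movement", "Transcendent"), ("Flint", "Transcendent"),
     ("Storm", "Transcendent"), ("Sun", "Transcendent")] := by decide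

set_option maxHeartbeats 2000000 in
theorem aztec_eq (day_sign : String) : get_aztec_quality day_sign = get_aztec_quality_alt day_sign := by
  by_cases h0 : day_sign = "Crocodile"
  · subst h0; decide
  by_cases h1 : day_sign = "Wind"
  · subst h1; decide
  by_cases h2 : day_sign = "House"
  · subst h2; decide
  by_cases h3 : day_sign = "Lizard"
  · subst h3; decide
  by_cases h4 : day_sign = "Serpent"
  · subst h4; decide
  by_cases h5 : day_sign = "Death"
  · subst h5; decide
  by_cases h6 : day_sign = "Deer"
  · subst h6; decide
  by_cases h7 : day_sign = "Rabbit"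
  · subst h7; decide
  by_cases h8 : day_sign = "Water"
  · subst h8; decide
  by_cases h9 : day_sign = "Dog"
  · subst h9; decide
  by_cases h10 : day_sign = "Monkey"
  · subst h10; decide
  by_cases h11 : day_sign = "Grass"
  · subst h11; decide
  by_cases h12 : day_sign = "Reed"
  · subst h12; decide
  by_cases h13 : day_sign = "Jaguar"
  · subst h13; decide
  by_cases h14 : day_sign = "Eagle"
  · subst h14; decide
  by_cases h15 : day_sign = "Vulture"
  · subst h15; decide
  by_cases h16 : day_sign = "Movement"
  · subst h16; decide
  by_cases h17 : day_sign = "Flint"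
  · subst h17; decide
  by_cases h18 : day_sign = "Storm"
  · subst h18; decide
  by_cases h19 : day_sign = "Sun"
  · subst h19; decide
  have b0 : ("Crocodile" == day_sign) = false := beq_eq_false_iff_ne.mpr (Ne.symm h0)
  have c0 : (day_sign == "Crocodile") = false := beq_eq_false_iff_ne.mpr h0
  have b1 : ("Wind" == day_sign) = false := beq_eq_false_iff_ne.mpr (Ne.symm h1)
  have c1 : (day_sign == "Wind") = false := beq_eq_false_iff_ne.mpr h1
  have b2 : ("House" == day_sign) = false := beq_eq_false_iff_ne.mpr (Ne.symm h2)
  have c2 : (day_sign == "House") = false := beq_eq_false_iff_ne.mpr h2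
  have b3 : ("Lizard" == day_sign) = false := beq_eq_false_iff_ne.mpr (Ne.symm h3)
  have c3 : (day_sign == "Lizard") = false := beq_eq_false_iff_ne.mpr h3
  have b4 : ("Serpent" == day_sign) = false := beq_eq_false_iff_ne.mpr (Ne.symm h4)
  have c4 : (day_sign == "Serpent") = false := beq_eq_false_iff_ne.mpr h4
  have b5 : ("Death" == day_sign) = false := beq_eq_false_iff_ne.mpr (Ne.symm h5)
  have c5 : (day_sign == "Death") = false := beq_eq_false_iff_ne.mpr h5
  have b6 : ("Deer" == day_sign) = false := beq_eq_false_iff_ne.mpr (Ne.symm h6)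
  have c6 : (day_sign == "Deer") = false := beq_eq_false_iff_ne.mpr h6
  have b7 : ("Rabbit" == day_sign) = false := beq_eq_false_iff_ne.mpr (Ne.symm h7)
  have c7 : (day_sign == "Rabbit") = false := beq_eq_false_iff_ne.mpr h7
  have b8 : ("Water" == day_sign) = false := beq_eq_false_iff_ne.mpr (Ne.symm h8)
  have c8 : (day_sign == "Water") = false := beq_eq_false_iff_ne.mpr h8
  have b9 : ("Dog" == day_sign) = false := beq_eq_false_iff_ne.mpr (Ne.symm h9)
  have c9 : (day_sign == "Dog") = false := beq_eq_false_iff_ne.mpr h9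
  have b10 : ("Monkey" == day_sign) = false := beq_eq_false_iff_ne.mpr (Ne.symm h10)
  have c10 : (day_sign == "Monkey") = false := beq_eq_false_iff_ne.mpr h10
  have b11 : ("Grass" == day_sign) = false := beq_eq_false_iff_ne.mpr (Ne.symm h11)
  have c11 : (day_sign == "Grass") = false := beq_eq_false_iff_ne.mpr h11
  have b12 : ("Reed" == day_sign) = false := beq_eq_false_iff_ne.mpr (Ne.symm h12)
  have c12 : (day_sign == "Reed") = false := beq_eq_false_iff_ne.mpr h12
  have b13 : ("Jaguar" == day_sign) = false := beq_eq_false_iff_ne.mpr (Ne.symm h13)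
  have c13 : (day_sign == "Jaguar") = false := beq_eq_false_iff_ne.mpr h13
  have b14 : ("Eagle" == day_sign) = false := beq_eq_false_iff_ne.mpr (Ne.symm h14)
  have c14 : (day_sign == "Eagle") = false := beq_eq_false_iff_ne.mpr h14
  have b15 : ("Vulture" == day_sign) = false := beq_eq_false_iff_ne.mpr (Ne.symm h15)
  have c15 : (day_sign == "Vulture") = false := beq_eq_false_iff_ne.mpr h15
  have b16 : ("Movement" == day_sign) = false := beq_eq_false_iff_ne.mpr (Ne.symm h16)
  have c16 : (day_sign == "Movement") = false := beq_eq_false_iff_ne.mpr h16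
  have b17 : ("Flint" == day_sign) = false := beq_eq_false_iff_ne.mpr (Ne.symm h17)
  have c17 : (day_sign == "Flint") = false := beq_eq_false_iff_ne.mpr h17
  have b18 : ("Storm" == day_sign) = false := beq_eq_false_iff_ne.mpr (Ne.symm h18)
  have c18 : (day_sign == "Storm") = false := beq_eq_false_iff_ne.mpr h18
  have b19 : ("Sun" == day_sign) = false := beq_eq_false_iff_ne.mpr (Ne.symm h19)
  have c19 : (day_sign == "Sun") = false := beq_eq_false_iff_ne.mpr h19
  simp [get_aztec_quality, get_aztec_quality_alt, aztecLoop, aztecQualities,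
    qualityBySign_eq, PySem.Dict.getD, PySem.Dict.get?_mk_cons, PySem.Dict.get?, List.find?, Option.getD,
    b0, c0, b1, c1, b2, c2, b3, c3, b4, c4, b5, c5, b6, c6, b7, c7, b8, c8, b9, c9, b10, c10, b11, c11, b12, c12, b13, c13, b14, c14, b15, c15, b16, c16, b17, c17, b18, c18, b19, c19]
  intros
  split_ifs <;> simp_all

-- ===== VERDICT (by name: the statement is the Claim_ definition above) =====
theorem get_aztec_quality_spec : Claim_equal_get_aztec_quality := by
  intro d _
  unfold Spec_get_aztec_quality
  exact aztec_eq d
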